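-- pv_equiv track=rewrite | github.com/wenke727/learningNote | algorithm/jiuzhang_beginning/chapter_08_Data_structure.py | firstUniqueNumber
-- ===== SOURCE A (Python) =====
-- def firstUniqueNumber(nums, number):
--     counter = {}
--
--     for num in nums:
--         counter[num] = counter.get(num, 0) + 1
--         if num == number:
--             break
--     # 在循环正常完成时执行，这意味着循环没有遇到任何 break 语句
--     else:
--         return -1
--
--     for num in counter:
--         if counter[num] == 1:
--             return num
--         if num == number:
--             break
--
--     return -1
-- ===== SOURCE B (Python) =====
-- def firstUniqueNumber(nums, number):
--     # Collect the prefix up to and including the first occurrence of number.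
--     prefix = []
--     for num in nums:
--         prefix.append(num)
--         if num == number:
--             # Brute-force uniqueness: an element is unique iff it appears
--             # neither before nor after its own position (no count table).
--             for i, x in enumerate(prefix):
--                 if x not in prefix[:i] and x not in prefix[i+1:]:
--                     return x
--             return -1
--     return -1
-- ===== Notes on version B (the rewrite author's own statement) =====
-- stated objective: simpler
-- what changed: A maintains a hash counter while scanning and then re-scans the dict keys with a break; B keeps no counts at all: it collects the prefix ending at the first occurrence of number and tests uniqueness of each prefix element by brute-force membership in the elements before and after it, trading the hash table for a short quadratic scan.
import Mathlib
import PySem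

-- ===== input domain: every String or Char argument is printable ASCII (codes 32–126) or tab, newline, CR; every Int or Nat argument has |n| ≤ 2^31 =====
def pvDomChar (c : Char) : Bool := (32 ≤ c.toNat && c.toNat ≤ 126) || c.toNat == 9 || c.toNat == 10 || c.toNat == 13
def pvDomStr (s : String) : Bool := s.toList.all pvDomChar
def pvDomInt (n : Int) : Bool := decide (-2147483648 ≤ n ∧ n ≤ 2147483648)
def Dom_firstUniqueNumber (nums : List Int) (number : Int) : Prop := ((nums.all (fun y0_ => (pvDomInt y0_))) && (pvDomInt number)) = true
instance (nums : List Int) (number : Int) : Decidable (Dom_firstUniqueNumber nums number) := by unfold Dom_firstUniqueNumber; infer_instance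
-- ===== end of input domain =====

-- B drops A's hash counter entirely: it collects the prefix up to the first occurrence of
-- `number` and tests each element's uniqueness by brute-force membership in the elements
-- before and after it; objective: simpler (a quadratic but shorter, table-free algorithm).

-- ===== PORT A =====
-- first loop of A: build the counter, stop after the first occurrence of `number`
-- (none = the loop ran to the end without break, i.e. Python's for-else fires).
def fuA_loop1 : List Int → Int → PySem.Dict Int Int → Option (PySem.Dict Int Int)
  | [], _, _ => none
  | n :: rest, number, counter =>
    let c := counter.insert n (counter.getD n 0 + 1)
    if n = number then some c else fuA_loop1 rest number c

-- second loop of A: over the dict keys, return the first key with count 1, break at `number`.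
def fuA_loop2 (counter : PySem.Dict Int Int) (number : Int) : List Int → Int
  | [] => -1
  | k :: rest =>
    if counter.getD k 0 = 1 then k
    else if k = number then -1
    else fuA_loop2 counter number rest

def firstUniqueNumber (nums : List Int) (number : Int) : Int :=
  match fuA_loop1 nums number PySem.Dict.empty with
  | none => -1
  | some c => fuA_loop2 c number c.keys

-- ===== PORT B =====
-- B's outer loop: accumulate the prefix up to and including the first occurrence of `number`.
def fuB_prefix : List Int → Int → List Int → Option (List Int)
  | [], _, _ => none
  | n :: rest, number, pre =>
    let p := pre ++ [n]
    if n = number then some p else fuB_prefix rest number p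

-- B's inner scan: `before` is prefix[:i], `x :: rest` the remainder; x is unique
-- iff it occurs in neither part (the Python `x not in prefix[:i] and x not in prefix[i+1:]`).
def fuB_find : List Int → List Int → Int
  | _, [] => -1
  | before, x :: rest =>
    if x ∈ before ∨ x ∈ rest then fuB_find (before ++ [x]) rest else x

def firstUniqueNumber_alt (nums : List Int) (number : Int) : Int :=
  match fuB_prefix nums number [] with
  | none => -1
  | some p => fuB_find [] p

-- ===== PRECONDITION & SPEC =====
def Spec_firstUniqueNumber (nums : List Int) (number : Int) (out : Int) : Prop := out = firstUniqueNumber_alt nums number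
instance (nums : List Int) (number : Int) (out : Int) : Decidable (Spec_firstUniqueNumber nums number out) := by unfold Spec_firstUniqueNumber; infer_instance

-- ===== CLAIM (what is proved, stated in full; the proofs are below) =====
def Claim_equal_firstUniqueNumber : Prop := ∀ (nums : List Int) (number : Int), Dom_firstUniqueNumber nums number → Spec_firstUniqueNumber nums number (firstUniqueNumber nums number)

-- ===== LEMMAS AND PROOFS =====

-- reference prefix: the elements up to and including the first occurrence of `number`.
def fuPref : List Int → Int → Option (List Int)
  | [], _ => none
  | n :: rest, number =>
    if n = number then some [n] else (fuPref rest number).map (n :: ·)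

-- reference scan: first element satisfying P, else -1.
def fuFindD (P : Int → Bool) : List Int → Int
  | [] => -1
  | x :: l => if P x then x else fuFindD P l

lemma fuPref_shape (nums : List Int) (number : Int) (p : List Int)
    (h : fuPref nums number = some p) :
    ∃ q, p = q ++ [number] ∧ number ∉ q := by
  induction nums generalizing p with
  | nil => simp [fuPref] at h
  | cons n rest ih =>
    by_cases hn : n = number
    · simp [fuPref, hn] at h
      exact ⟨[], by simp [← h]⟩
    · simp [fuPref, hn] at h
      obtain ⟨p', hp', rfl⟩ := h
      obtain ⟨q, rfl, hq⟩ := ih p' hp'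
      exact ⟨n :: q, rfl, by simp [hq, Ne.symm hn]⟩

lemma fuA_loop1_eq (nums : List Int) (number : Int) (c : PySem.Dict Int Int) :
    fuA_loop1 nums number c
      = (fuPref nums number).map
          (fun p => p.foldl (fun d x => d.insert x (d.getD x 0 + 1)) c) := by
  induction nums generalizing c with
  | nil => rfl
  | cons n rest ih =>
    by_cases hn : n = number <;>
      simp [fuA_loop1, fuPref, hn, ih, Option.map_map, Function.comp_def, List.foldl_cons]

lemma fuB_prefix_eq (nums : List Int) (number : Int) (pre : List Int) :
    fuB_prefix nums number pre = (fuPref nums number).map (pre ++ ·) := by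
  induction nums generalizing pre with
  | nil => rfl
  | cons n rest ih =>
    by_cases hn : n = number <;>
      simp [fuB_prefix, fuPref, hn, ih, Option.map_map, Function.comp_def]

-- the break at `number` in A's second loop is inert when `number` is not before the last key
lemma fuA_loop2_eq_findD (c : PySem.Dict Int Int) (number : Int) (ks : List Int)
    (h : number ∉ ks.dropLast) :
    fuA_loop2 c number ks = fuFindD (fun k => c.getD k 0 == 1) ks := by
  induction ks with
  | nil => rfl
  | cons k rest ih =>
    by_cases h1 : c.getD k 0 = 1
    · simp [fuA_loop2, fuFindD, h1]
    · by_cases hk : k = number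
      · have : rest = [] := by
          by_contra hne
          rw [List.dropLast_cons_of_ne_nil hne] at h
          exact h (by simp [hk])
        subst this
        simp [fuA_loop2, fuFindD, hk]
      · have hrest : number ∉ rest.dropLast := by
          intro hm
          rcases List.eq_nil_or_concat' rest with rfl | ⟨_, _, rfl⟩
          · simp at hm
          · apply h
            rw [List.dropLast_cons_of_ne_nil (by simp)]
            exact List.mem_cons_of_mem _ hm
        simp [fuA_loop2, fuFindD, h1, hk, ih hrest]

-- findD skips a prefix containing no satisfying element
lemma fuFindD_append (P : Int → Bool) (u v : List Int) (h : ∀ x ∈ u, ¬ P x) :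
    fuFindD P (u ++ v) = fuFindD P v := by
  induction u with
  | nil => rfl
  | cons a u ih =>
    have := h a (by simp)
    simp [fuFindD, this, ih (fun x hx => h x (by simp [hx]))]

lemma fuFindD_none (P : Int → Bool) (u : List Int) (h : ∀ x ∈ u, ¬ P x) :
    fuFindD P u = -1 := by
  simpa using fuFindD_append P u [] h

lemma foldl_add_grows (l : List Int) (s : PySem.Set Int) :
    ∃ t, l.foldl PySem.Set.add s = s ++ t := by
  induction l generalizing s with
  | nil => exact ⟨[], by simp⟩
  | cons a l ih =>
    obtain ⟨t, ht⟩ := ih (PySem.Set.add s a)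
    by_cases hc : a ∈ s
    · exact ⟨t, by simpa [PySem.Set.add, hc] using ht⟩
    · exact ⟨a :: t, by simpa [PySem.Set.add, hc, List.append_assoc] using ht⟩

-- scanning the deduplicated keys finds the same first satisfying VALUE as scanning the list
lemma fuFindD_foldl_add (P : Int → Bool) (p : List Int) (s : PySem.Set Int)
    (hs : ∀ x ∈ s, ¬ P x) :
    fuFindD P (p.foldl PySem.Set.add s) = fuFindD P p := by
  induction p generalizing s with
  | nil => simpa [fuFindD] using fuFindD_none P s hs
  | cons a p ih =>
    by_cases hPa : P a
    · have ha : a ∉ s := fun h => hs a h hPa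
      have hadd : PySem.Set.add s a = s ++ [a] := by
        simp [PySem.Set.add, PySem.Set.contains]
        intro h
        exact absurd (by exact_mod_cast h) ha
      obtain ⟨t, ht⟩ := foldl_add_grows p (PySem.Set.add s a)
      calc fuFindD P ((a :: p).foldl PySem.Set.add s)
          = fuFindD P (s ++ [a] ++ t) := by simp [List.foldl_cons, ← hadd, ht]
        _ = a := by rw [List.append_assoc, fuFindD_append P s _ hs]; simp [fuFindD, hPa]
        _ = fuFindD P (a :: p) := by simp [fuFindD, hPa]
    · have hs' : ∀ x ∈ PySem.Set.add s a, ¬ P x := by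
        intro x hx
        rcases (PySem.Set.mem_add s a x).mp hx with h | rfl
        · exact hs x h
        · exact hPa
      simp [List.foldl_cons, fuFindD, hPa, ih (PySem.Set.add s a) hs']

-- B's positional scan computes findD with the count-1 predicate over the whole prefix
lemma fuB_find_eq (p : List Int) :
    ∀ (l before : List Int), p = before ++ l →
      fuB_find before l = fuFindD (fun x => ((p.count x : Int) == 1)) l := by
  intro l
  induction l with
  | nil => intro before _; rfl
  | cons x rest ih =>
    intro before hp
    have hcnt : p.count x = before.count x + rest.count x + 1 := by
      subst hp; simp [List.count_append]; ring
    by_cases hmem : x ∈ before ∨ x ∈ rest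
    · have h1 : 1 ≤ before.count x + rest.count x := by
        rcases hmem with h | h
        · have := List.one_le_count_iff.mpr h; omega
        · have := List.one_le_count_iff.mpr h; omega
      have hP : ((p.count x : Int) == 1) = false := by
        simp [hcnt]; omega
      simp only [fuB_find, fuFindD, hmem, if_true, hP, Bool.false_eq_true, if_false]
      exact ih (before ++ [x]) (by simp [hp])
    · push Not at hmem
      have h0b : before.count x = 0 := List.count_eq_zero.mpr hmem.1
      have h0r : rest.count x = 0 := List.count_eq_zero.mpr hmem.2
      have hP : ((p.count x : Int) == 1) = true := by
        simp [hcnt, h0b, h0r]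
      simp [fuB_find, fuFindD, hmem.1, hmem.2, hP]

-- ===== VERDICT (by name: the statement is the Claim_ definition above) =====
theorem firstUniqueNumber_spec : Claim_equal_firstUniqueNumber := by
  unfold Claim_equal_firstUniqueNumber
  intro nums number _
  unfold Spec_firstUniqueNumber firstUniqueNumber firstUniqueNumber_alt
  rw [fuA_loop1_eq, fuB_prefix_eq]
  cases h : fuPref nums number with
  | none => rfl
  | some p =>
    simp only [Option.map_some, List.nil_append]
    obtain ⟨q, hp, hq⟩ := fuPref_shape nums number p h
    have hc : p.foldl (fun d x => d.insert x (d.getD x 0 + 1)) PySem.Dict.empty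
        = PySem.Dict.counter p := PySem.Dict.foldl_insert_getD_add_one_eq_counter p
    rw [hc, PySem.Dict.keys_counter]
    have hofl : PySem.Set.ofList p = PySem.Set.ofList q ++ [number] := by
      have hnq : number ∉ PySem.Set.ofList q := fun hm => hq ((PySem.Set.mem_ofList _ _).mp hm)
      rw [hp]
      show List.foldl PySem.Set.add PySem.Set.empty (q ++ [number]) = _
      rw [List.foldl_append]
      show PySem.Set.add (List.foldl PySem.Set.add PySem.Set.empty q) number = _
      simp [PySem.Set.add, PySem.Set.ofList_eq_foldl, PySem.Set.empty]
      intro hm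
      exact absurd (by simpa [PySem.Set.ofList_eq_foldl, PySem.Set.empty] using hm) hnq
    have hnd : number ∉ (PySem.Set.ofList p).dropLast := by
      rw [hofl, List.dropLast_concat]
      exact fun hm => hq ((PySem.Set.mem_ofList _ _).mp hm)
    rw [fuA_loop2_eq_findD _ _ _ hnd]
    have hPeq : (fun k => ((PySem.Dict.counter p).getD k 0 == 1))
        = (fun x => ((p.count x : Int) == 1)) := by
      funext k
      rw [PySem.Dict.getD_counter]
    rw [hPeq]
    have hfold : PySem.Set.ofList p = p.foldl PySem.Set.add PySem.Set.empty :=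
      PySem.Set.ofList_eq_foldl p
    rw [hfold, fuFindD_foldl_add _ _ _ (by intro x hx; simp [PySem.Set.empty] at hx)]
    exact (fuB_find_eq p p [] rfl).symm
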